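-- pv_equiv track=rewrite | github.com/txw-github/clip | enhanced_intelligent_clipper.py | build_episode_context
-- ===== SOURCE A (Python) =====
-- from typing import List, Dict, Optional, Tuple
--
-- def build_episode_context(episode_data: Dict, series_context: str) -> str:
--     """构建完整的剧集上下文"""
--     # 取前80%的字幕内容作为完整上下文
--     subtitles = episode_data['subtitles']
--     context_end = int(len(subtitles) * 0.8)
--
--     context_parts = []
--     for i in range(0, context_end, 50):  # 每50句分一段
--         segment_texts = [sub['text'] for sub in subtitles[i:i+50]]
--         context_parts.append(' '.join(segment_texts))
--
--     return '\n\n'.join(context_parts)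
-- ===== SOURCE B (Python) =====
-- def build_episode_context(episode_data, series_context):
--     """Stream the subtitles once, grouping them into 50-line blocks; stop at the
--     80% cutoff, but let a block that is already underway run to completion."""
--     subtitles = episode_data['subtitles']
--     cutoff = int(len(subtitles) * 0.8)
--     parts = []
--     block = []
--     for i, sub in enumerate(subtitles):
--         if not block and i >= cutoff:
--             break
--         block.append(sub['text'])
--         if len(block) == 50:
--             parts.append(' '.join(block))
--             block = []
--     if block:
--         parts.append(' '.join(block))
--     return '\n\n'.join(parts)
-- ===== Notes on version B (the rewrite author's own statement) =====
-- stated objective: alternative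
-- what changed: Replaces range(0,end,50) index arithmetic with repeated slicing by a single streaming pass that groups subtitles into 50-line blocks, stopping at the 80% cutoff but completing a block already underway; Pre_ excludes exactly the KeyError inputs (missing 'subtitles', or a processed subtitle missing 'text').
import Mathlib
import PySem

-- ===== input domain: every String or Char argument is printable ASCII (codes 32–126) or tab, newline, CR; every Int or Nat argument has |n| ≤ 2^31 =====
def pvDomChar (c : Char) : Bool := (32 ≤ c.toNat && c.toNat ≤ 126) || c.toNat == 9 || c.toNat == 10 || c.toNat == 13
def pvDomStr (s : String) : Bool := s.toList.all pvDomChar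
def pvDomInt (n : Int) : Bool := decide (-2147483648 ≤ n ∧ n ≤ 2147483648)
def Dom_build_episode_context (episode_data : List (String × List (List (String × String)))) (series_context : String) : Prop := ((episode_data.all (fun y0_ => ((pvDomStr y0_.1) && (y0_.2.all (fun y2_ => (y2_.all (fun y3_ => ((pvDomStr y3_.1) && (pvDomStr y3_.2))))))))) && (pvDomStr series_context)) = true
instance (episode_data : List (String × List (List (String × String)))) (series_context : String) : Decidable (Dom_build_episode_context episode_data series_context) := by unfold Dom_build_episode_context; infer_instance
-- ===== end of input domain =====

-- B replaces A's range(0, context_end, 50)-and-slice chunking by a single streaming pass that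
-- groups the subtitles into 50-line blocks, stopping at the cutoff but completing a block
-- already underway (objective: alternative decomposition, same cost).
-- int(len(subtitles) * 0.8) is ported as 4 * len / 5: for 0 ≤ n ≤ 2^31 the float product
-- n * 0.8 rounds to a value whose floor is 4n/5 (error < 2.4e-7 while the fractional gap is ≥ 0.2).

-- ===== PORT A =====
def build_episode_context (episode_data : List (String × List (List (String × String)))) (series_context : String) : String :=
  let subtitles := (PySem.Dict.get? (PySem.Dict.mk episode_data) "subtitles").getD []
  let context_end : Nat := 4 * subtitles.length / 5
  let context_parts := (PySem.List.pyRange 0 (context_end : Int) 50).map (fun i =>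
    PySem.Str.join " " ((PySem.List.slice subtitles (some i) (some (i + 50))).map
      (fun sub => (PySem.Dict.get? (PySem.Dict.mk sub) "text").getD "")))
  PySem.Str.join "\n\n" context_parts

-- ===== PORT B =====
/-- B's for-loop with break: `enumerate` is carried as the index parameter `i`;
returns the final (parts, block) state at the break or at the end of the list. -/
def pvBLoop (cutoff : Nat) : List (List (String × String)) → Nat → List String → List String → List String × List String
  | [], _, parts, block => (parts, block)
  | sub :: rest, i, parts, block =>
    if block = [] ∧ cutoff ≤ i then (parts, block)
    else
      let block' := block ++ [(PySem.Dict.get? (PySem.Dict.mk sub) "text").getD ""]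
      if block'.length == 50 then pvBLoop cutoff rest (i + 1) (parts ++ [PySem.Str.join " " block']) []
      else pvBLoop cutoff rest (i + 1) parts block'

def build_episode_context_alt (episode_data : List (String × List (List (String × String)))) (series_context : String) : String :=
  let subtitles := (PySem.Dict.get? (PySem.Dict.mk episode_data) "subtitles").getD []
  let cutoff : Nat := 4 * subtitles.length / 5
  let st := pvBLoop cutoff subtitles 0 [] []
  let parts := if st.2 ≠ [] then st.1 ++ [PySem.Str.join " " st.2] else st.1
  PySem.Str.join "\n\n" parts

-- ===== PRECONDITION & SPEC =====
-- Pre_ excludes exactly the inputs where the Python raises KeyError: a missing 'subtitles' key,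
-- or a subtitle read by the loop (the first ceil(context_end/50)*50 entries) missing 'text'.
def Pre_build_episode_context (episode_data : List (String × List (List (String × String)))) (series_context : String) : Prop :=
  (PySem.Dict.get? (PySem.Dict.mk episode_data) "subtitles").isSome = true ∧
  ∀ sub ∈ ((PySem.Dict.get? (PySem.Dict.mk episode_data) "subtitles").getD []).take
      ((4 * ((PySem.Dict.get? (PySem.Dict.mk episode_data) "subtitles").getD []).length / 5 + 49) / 50 * 50),
    (PySem.Dict.get? (PySem.Dict.mk sub) "text").isSome = true
instance (episode_data : List (String × List (List (String × String)))) (series_context : String) : Decidable (Pre_build_episode_context episode_data series_context) := by unfold Pre_build_episode_context; infer_instance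

def pvWitness_build_episode_context : (List (String × List (List (String × String)))) × String :=
  ([("subtitles", [[("text", "hi")]])], "s")

def Spec_build_episode_context (episode_data : List (String × List (List (String × String)))) (series_context : String) (out : String) : Prop := out = build_episode_context_alt episode_data series_context
instance (episode_data : List (String × List (List (String × String)))) (series_context : String) (out : String) : Decidable (Spec_build_episode_context episode_data series_context out) := by unfold Spec_build_episode_context; infer_instance

-- ===== CLAIM (what is proved, stated in full; the proofs are below) =====
def Claim_equal_build_episode_context : Prop := ∀ (episode_data : List (String × List (List (String × String)))) (series_context : String), Dom_build_episode_context episode_data series_context → Pre_build_episode_context episode_data series_context → Spec_build_episode_context episode_data series_context (build_episode_context episode_data series_context)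

-- ===== LEMMAS AND PROOFS =====

/-- the text of one subtitle dict, as both ports read it -/
def pvText (sub : List (String × String)) : String :=
  (PySem.Dict.get? (PySem.Dict.mk sub) "text").getD ""

/-- INNER: while the block is partially filled (length 50 - k, 0 < k ≤ 50), the loop consumes
the next k elements (or the whole rest, if shorter) with no break possible. -/
lemma pv_inner (ce : Nat) : ∀ (rest : List (List (String × String))) (k : Nat) (i : Nat)
    (parts block : List String), block ≠ [] → block.length + k = 50 → 0 < k →
    pvBLoop ce rest i parts block =
      if k ≤ rest.length then
        pvBLoop ce (rest.drop k) (i + k) (parts ++ [PySem.Str.join " " (block ++ (rest.take k).map pvText)]) []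
      else (parts, block ++ rest.map pvText) := by
  intro rest
  induction rest with
  | nil =>
    intro k i parts block hne hlen hk
    rw [if_neg (by simp; omega)]
    simp [pvBLoop]
  | cons sub rs ih =>
    intro k i parts block hne hlen hk
    rw [pvBLoop]
    rw [if_neg (by simp [hne])]
    by_cases hk1 : k = 1
    · subst hk1
      rw [if_pos (show ((block ++ [(PySem.Dict.get? (PySem.Dict.mk sub) "text").getD ""]).length == 50) = true by simp; omega)]
      rw [if_pos (show 1 ≤ (sub :: rs).length by simp)]
      simp [pvText]
    · rw [if_neg (show ¬ ((block ++ [(PySem.Dict.get? (PySem.Dict.mk sub) "text").getD ""]).length == 50) = true by simp; omega)]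
      rw [ih (k - 1) (i + 1) parts _ (by simp) (by simp; omega) (by omega)]
      by_cases hkr : k - 1 ≤ rs.length
      · rw [if_pos hkr, if_pos (show k ≤ (sub :: rs).length by simp; omega)]
        have hdrop : rs.drop (k - 1) = (sub :: rs).drop k := by
          rw [show k = (k - 1) + 1 by omega]; simp
        have htake : block ++ ((sub :: rs).take k).map pvText
            = block ++ [(PySem.Dict.get? (PySem.Dict.mk sub) "text").getD ""] ++ ((rs.take (k - 1)).map pvText) := by
          rw [show k = (k - 1) + 1 by omega]
          simp [pvText]
        rw [hdrop, ← htake, show i + 1 + (k - 1) = i + k by omega]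
      · rw [if_neg hkr, if_neg (show ¬ k ≤ (sub :: rs).length by simp; omega)]
        simp [pvText]

/-- flush of the final state, as B computes it -/
def pvFlush (st : List String × List String) : List String :=
  if st.2 ≠ [] then st.1 ++ [PySem.Str.join " " st.2] else st.1

/-- OUTER: from an empty block at index i, the flushed loop result appends one joined
50-chunk of `rest` per remaining block count. -/
lemma pv_outer (ce : Nat) : ∀ (m : Nat) (rest : List (List (String × String))) (i : Nat)
    (parts : List String), m = (ce - i + 49) / 50 → ce ≤ i + rest.length →
    pvFlush (pvBLoop ce rest i parts []) =
      parts ++ (List.range m).map (fun k => PySem.Str.join " " (((rest.drop (50 * k)).take 50).map pvText)) := by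
  intro m
  induction m with
  | zero =>
    intro rest i parts hm hlen
    have hice : ce ≤ i := by omega
    cases rest with
    | nil => simp [pvBLoop, pvFlush]
    | cons sub rs =>
      rw [pvBLoop, if_pos ⟨rfl, hice⟩]
      simp [pvFlush]
  | succ m ih =>
    intro rest i parts hm hlen
    have hice : i < ce := by omega
    cases rest with
    | nil => exfalso; simp at hlen; omega
    | cons sub rs =>
      rw [pvBLoop, if_neg (by simp; omega)]
      rw [if_neg (show ¬ ((([] : List String) ++ [(PySem.Dict.get? (PySem.Dict.mk sub) "text").getD ""]).length == 50) = true by simp)]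
      rw [pv_inner ce rs 49 (i + 1) parts _ (by simp) (by simp) (by omega)]
      by_cases hrs : 49 ≤ rs.length
      · rw [if_pos hrs]
        rw [ih (rs.drop 49) (i + 1 + 49) _ (by omega) (by simp at hlen ⊢; omega)]
        rw [List.range_succ_eq_map, List.map_cons, List.map_map]
        simp only [List.append_assoc, List.singleton_append, List.nil_append]
        congr 2
        apply List.map_congr_left
        intro a _
        simp only [Function.comp, Nat.succ_eq_add_one]
        have h1 : (sub :: rs).drop (50 * (a + 1)) = (rs.drop 49).drop (50 * a) := by
          rw [show 50 * (a + 1) = (50 * a + 49) + 1 by omega, List.drop_succ_cons, List.drop_drop]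
          congr 1
          omega
        rw [h1]
      · rw [if_neg hrs]
        have hm0 : m = 0 := by simp at hlen; omega
        subst hm0
        have htk2 : (rs.map pvText).take 49 = rs.map pvText :=
          List.take_of_length_le (by simp; omega)
        simp [pvFlush, List.range_succ, htk2, pvText]

theorem pv_main (subs : List (List (String × String))) :
    PySem.Str.join "\n\n" ((PySem.List.pyRange 0 ((4 * subs.length / 5 : Nat) : Int) 50).map (fun i =>
      PySem.Str.join " " ((PySem.List.slice subs (some i) (some (i + 50))).map
        (fun sub => (PySem.Dict.get? (PySem.Dict.mk sub) "text").getD ""))))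
    = PySem.Str.join "\n\n"
        (if (pvBLoop (4 * subs.length / 5) subs 0 [] []).2 ≠ [] then
          (pvBLoop (4 * subs.length / 5) subs 0 [] []).1
            ++ [PySem.Str.join " " (pvBLoop (4 * subs.length / 5) subs 0 [] []).2]
         else (pvBLoop (4 * subs.length / 5) subs 0 [] []).1) := by
  set ce : Nat := 4 * subs.length / 5 with hce
  have hcen : ce ≤ subs.length := by omega
  set m : Nat := (ce + 49) / 50 with hm
  congr 1
  rw [show (if (pvBLoop ce subs 0 [] []).2 ≠ [] then
      (pvBLoop ce subs 0 [] []).1 ++ [PySem.Str.join " " (pvBLoop ce subs 0 [] []).2]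
     else (pvBLoop ce subs 0 [] []).1) = pvFlush (pvBLoop ce subs 0 [] []) from rfl]
  rw [pv_outer ce m subs 0 [] (by omega) (by omega)]
  -- left-hand side via pyRange_of_pos
  rw [PySem.List.pyRange_of_pos 0 (ce : Int) (by omega)]
  have hcount : (if (0 : Int) < (ce : Int) then (((ce : Int) - 0 + 50 - 1) / 50).toNat else 0) = m := by
    by_cases h : 0 < ce
    · rw [if_pos (by exact_mod_cast h)]
      omega
    · rw [if_neg (by omega), hm]
      omega
  rw [hcount, List.map_map]
  simp only [List.nil_append]
  apply List.map_congr_left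
  intro k _
  simp only [Function.comp]
  have e1 : (0 : Int) + 50 * (k : Int) = ((50 * k : Nat) : Int) := by push_cast; ring
  have e3 : ((50 * k : Nat) : Int) + 50 = ((50 * k + 50 : Nat) : Int) := by push_cast; ring
  rw [e1, e3, PySem.List.slice_natCast]
  have e4 : 50 * k + 50 - 50 * k = 50 := by omega
  rw [e4]
  rfl

-- ===== VERDICT (by name: the statement is the Claim_ definition above) =====
theorem build_episode_context_spec : Claim_equal_build_episode_context := by
  intro episode_data series_context _ _
  unfold Spec_build_episode_context build_episode_context build_episode_context_alt
  exact pv_main ((PySem.Dict.get? (PySem.Dict.mk episode_data) "subtitles").getD [])
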